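-- pv_equiv track=rewrite | github.com/atif-hassan/Clustering-based-Topic-Recommendation | Research_Area_Clustering.py | newCentroid
-- ===== SOURCE A (Python) =====
-- def newCentroid(lines):
--     #All available topics are stored in this list
--     topicList = []
--     #The frequency of each topic is stored in this list
--     freq = []
--     #Used for checking
--     flag = 0
--
--     for line in range(0, len(lines)):
--         #Split each line into topics separated by comma
--         words = lines[line].strip().split(',')
--         #Check if current topic already exists, then increase its count else append it to the list
--         for i in range(0, len(words)):
--             for j in range(0, len(topicList)):
--                 if topicList[j] == words[i].strip():
--                     freq[j]+=1
--                     flag = 1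
--                     break
--             if flag == 0:
--                 topicList.append(words[i].strip())
--                 freq.append(1)
--             else:
--                 flag = 0
--
--     #Sort the topics in decreasing order of frequency       <--Requires optimal sorting
--     for i in range(0, len(freq)):
--         for j in range(0, len(freq)):
--             if freq[i] > freq[j]:
--                 temp = freq[i]
--                 freq[i] = freq[j]
--                 freq[j] = temp
--                 tempStr = topicList[i]
--                 topicList[i] = topicList[j]
--                 topicList[j] = tempStr
--
--     #Select the first topic which has occurred maximum number of times
--     newCentroid = topicList[0]
--     newCentroid = newCentroid.replace('and ', '')
--     newCentroid = newCentroid.replace('for ', '')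
--     newCentroid = newCentroid.lower()
--
--     return newCentroid
-- ===== SOURCE B (Python) =====
-- def newCentroid(lines):
--     # Insertion-ordered frequency dictionary instead of parallel lists + bubble sort.
--     freq = {}
--     for line in lines:
--         for word in line.strip().split(','):
--             t = word.strip()
--             freq[t] = freq.get(t, 0) + 1
--     items = list(freq.items())
--     best_topic, best_count = items[0]
--     for t, c in items[1:]:
--         if c > best_count:
--             best_topic, best_count = t, c
--     return best_topic.replace('and ', '').replace('for ', '').lower()
-- ===== Notes on version B (the rewrite author's own statement) =====
-- stated objective: faster
-- what changed: A's parallel topicList/freq lists with a linear scan of the topic list per word and an O(k^2) double-loop swap sort are replaced by an insertion-ordered frequency dict (freq[t]=freq.get(t,0)+1) and one linear scan of the items for the most frequent topic; no sorting at all.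
-- outside the precondition, e.g. on newCentroid(['and C,e,F f,B', 'for D,e,and C,A', 'A']): A returns 'e', B returns 'c'
import Mathlib
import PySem

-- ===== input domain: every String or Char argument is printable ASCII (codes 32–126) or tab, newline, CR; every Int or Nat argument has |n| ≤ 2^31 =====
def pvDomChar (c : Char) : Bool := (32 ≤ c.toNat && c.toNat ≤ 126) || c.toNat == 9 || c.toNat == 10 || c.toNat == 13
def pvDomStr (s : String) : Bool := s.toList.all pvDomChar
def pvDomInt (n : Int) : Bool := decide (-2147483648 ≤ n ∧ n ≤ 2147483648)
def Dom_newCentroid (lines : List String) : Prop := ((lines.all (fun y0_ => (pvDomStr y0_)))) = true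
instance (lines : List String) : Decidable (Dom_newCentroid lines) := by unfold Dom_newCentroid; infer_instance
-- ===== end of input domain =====

-- B replaces A's parallel-list scans and double-loop swap sort by an insertion-ordered
-- frequency dict and a single linear max scan (objective: faster; measured).

-- ===== PORT A =====
-- line.strip().split(',')  (this identical expression occurs in both Pythons)
def pvWords (line : String) : List String :=
  (PySem.Chars.splitOn (PySem.Str.strip line).toList [',']).map String.ofList

-- A's inner j-loop with flag/break: scan topicList, bump freq at the first match, else append
def pvBump : List String → List Int → String → List String × List Int
  | t :: ts, f :: fs, w =>
    if t == w then (t :: ts, (f + 1) :: fs)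
    else
      let r := pvBump ts fs w
      (t :: r.1, f :: r.2)
  | ts, fs, w => (ts ++ [w], fs ++ [1])

-- temp = l[i]; l[i] = l[j]; l[j] = temp
def pvSwap {α : Type} (d : α) (l : List α) (i j : Nat) : List α :=
  (l.set i (l.getD j d)).set j (l.getD i d)

def newCentroid (lines : List String) : String :=
  -- counting phase: parallel lists topicList / freq
  let st := lines.foldl
    (fun st line => (pvWords line).foldl
      (fun st w => pvBump st.1 st.2 (PySem.Str.strip w)) st)
    (([], []) : List String × List Int)
  -- the double-loop swap "sort"
  let n := st.2.length
  let st2 := (List.range n).foldl (fun st i =>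
    (List.range n).foldl (fun st j =>
      if st.2.getD i 0 > st.2.getD j 0 then (pvSwap "" st.1 i j, pvSwap 0 st.2 i j)
      else st) st) st
  -- topicList[0] cleaned (IndexError on the empty input: excluded by Pre_)
  let nc := st2.1.getD 0 ""
  PySem.Str.lower (PySem.Str.replace (PySem.Str.replace nc "and " "") "for " "")

-- ===== PORT B =====
def newCentroid_alt (lines : List String) : String :=
  let freq : PySem.Dict String Int := lines.foldl
    (fun d line => (pvWords line).foldl
      (fun d w => d.insert (PySem.Str.strip w) (d.getD (PySem.Str.strip w) 0 + 1)) d)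
    PySem.Dict.empty
  let items := freq.items
  -- items[0] (IndexError on the empty input: excluded by Pre_) and items[1:]
  let best := (items.drop 1).foldl (fun b q => if q.2 > b.2 then q else b) (items.getD 0 ("", 0))
  PySem.Str.lower (PySem.Str.replace (PySem.Str.replace best.1 "and " "") "for " "")

-- ===== PRECONDITION & SPEC =====
-- the stripped topic tokens of the input, in order
def pvTokens (lines : List String) : List String :=
  lines.flatMap (fun line => (pvWords line).map PySem.Str.strip)

-- the distinct topics in first-occurrence order, each paired with its frequency
def pvPairs (lines : List String) : List (String × Int) :=
  (PySem.Set.ofList (pvTokens lines)).map (fun k => (k, ((pvTokens lines).count k : Int)))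

def pvMaxF (lines : List String) : Int :=
  ((pvPairs lines).map (·.2)).foldl max 0

-- Pre_ excludes the empty input, on which both Pythons raise IndexError, and inputs whose
-- maximum frequency is shared by several topics while not all frequencies are equal: there
-- A's double-loop swap "sort" breaks the tie by an accidental permutation that no one would
-- specify (B keeps the earliest most-frequent topic).
def Pre_newCentroid (lines : List String) : Prop :=
  pvTokens lines ≠ [] ∧
  ((pvPairs lines).countP (fun p => p.2 == pvMaxF lines) = 1 ∨
   ∀ p ∈ pvPairs lines, p.2 = pvMaxF lines)

instance (lines : List String) : Decidable (Pre_newCentroid lines) := by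
  unfold Pre_newCentroid; infer_instance

def pvWitness_newCentroid : List String := ["a,b,a"]

def Spec_newCentroid (lines : List String) (out : String) : Prop := out = newCentroid_alt lines
instance (lines : List String) (out : String) : Decidable (Spec_newCentroid lines out) := by
  unfold Spec_newCentroid; infer_instance

-- ===== CLAIM (what is proved, stated in full; the proofs are below) =====
def Claim_equal_newCentroid : Prop :=
  ∀ (lines : List String), Dom_newCentroid lines → Pre_newCentroid lines →
    Spec_newCentroid lines (newCentroid lines)

-- ===== LEMMAS AND PROOFS =====
def pvD0 : String × Int := ("", 0)

def pvSwapP (l : List (String × Int)) (i j : Nat) : List (String × Int) :=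
  (l.set i (l.getD j pvD0)).set j (l.getD i pvD0)

def pvStepP (i j : Nat) (l : List (String × Int)) : List (String × Int) :=
  if (l.getD i pvD0).2 > (l.getD j pvD0).2 then pvSwapP l i j else l

def pvPassP (js : List Nat) (i : Nat) (l : List (String × Int)) : List (String × Int) :=
  js.foldl (fun l j => pvStepP i j l) l

def pvSortP (c : List (String × Int)) : List (String × Int) :=
  (List.range c.length).foldl (fun l i => pvPassP (List.range c.length) i l) c

def pvCOf (ws : List String) : List (String × Int) :=
  (PySem.Set.ofList ws).map (fun k => (k, (ws.count k : Int)))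

theorem pvPairs_eq (lines : List String) : pvPairs lines = pvCOf (pvTokens lines) := rfl

-- ---- getD through projections ----
theorem pvGetD_map_fst (l : List (String × Int)) (i : Nat) :
    (l.map Prod.fst).getD i "" = (l.getD i pvD0).1 := by
  simp only [List.getD, List.getElem?_map, pvD0]
  cases l[i]? <;> simp

theorem pvGetD_map_snd (l : List (String × Int)) (i : Nat) :
    (l.map Prod.snd).getD i 0 = (l.getD i pvD0).2 := by
  simp only [List.getD, List.getElem?_map, pvD0]
  cases l[i]? <;> simp

-- ---- the counting phase ----
theorem pvBump_spec (ks : List String) (f : String → Int) (w : String) (hnd : ks.Nodup) :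
    pvBump ks (ks.map f) w =
      if w ∈ ks then (ks, ks.map (fun k => if k = w then f k + 1 else f k))
      else (ks ++ [w], ks.map f ++ [1]) := by
  induction ks with
  | nil => simp [pvBump]
  | cons k ks ih =>
    simp only [List.map_cons, pvBump]
    rcases List.nodup_cons.mp hnd with ⟨hk, hnd'⟩
    by_cases hkw : k = w
    · subst hkw
      simp only [beq_self_eq_true, List.mem_cons, true_or, if_pos]
      have hmap : List.map (fun k1 => if k1 = k then f k1 + 1 else f k1) ks = List.map f ks :=
        List.map_congr_left (fun x hx => by
          have : x ≠ k := fun h => hk (h ▸ hx)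
          simp [this])
      rw [hmap]
    · have : (k == w) = false := beq_false_of_ne hkw
      simp only [this, if_false]
      rw [ih hnd']
      by_cases hw : w ∈ ks
      · simp [hw, hkw]
      · have : ¬ (w ∈ k :: ks) := by simp [hw, Ne.symm hkw]
        simp [hw, this, hkw]

theorem pvCountA (ws : List String) :
    ws.foldl (fun st t => pvBump st.1 st.2 t) (([], []) : List String × List Int)
      = ((pvCOf ws).map Prod.fst, (pvCOf ws).map Prod.snd) := by
  induction ws using List.reverseRecOn with
  | nil => simp [pvCOf, PySem.Set.ofList]
  | append_singleton p w ih =>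
    rw [List.foldl_append, ih]
    simp only [List.foldl_cons, List.foldl_nil]
    have hmapfst : (pvCOf p).map Prod.fst = PySem.Set.ofList p := by
      simp [pvCOf, List.map_map, Function.comp_def]
    have hmapsnd : (pvCOf p).map Prod.snd
        = (PySem.Set.ofList p).map (fun k => (p.count k : Int)) := by
      simp [pvCOf, List.map_map, Function.comp_def]
    rw [hmapfst, hmapsnd]
    rw [pvBump_spec _ _ _ (PySem.Set.nodup_ofList p)]
    have hofl : PySem.Set.ofList (p ++ [w]) = PySem.Set.add (PySem.Set.ofList p) w :=
      PySem.Set.ofList_append_singleton p w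
    by_cases hw : w ∈ p
    · have hmem : w ∈ PySem.Set.ofList p := by simp [PySem.Set.mem_ofList, hw]
      rw [if_pos hmem]
      have : PySem.Set.ofList (p ++ [w]) = PySem.Set.ofList p := by
        rw [hofl, PySem.Set.add_of_mem hmem]
      simp only [pvCOf, this]
      simp only [Prod.mk.injEq]
      constructor
      · simp [List.map_map, Function.comp_def]
      · simp only [List.map_map, Function.comp_def]
        apply List.map_congr_left
        intro k hk
        by_cases hkw : k = w
        · subst hkw
          simp [List.count_append]
        · simp [List.count_append, hkw, List.count_singleton, beq_false_of_ne (Ne.symm hkw)]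
    · have hmem : ¬ w ∈ PySem.Set.ofList p := by simp [PySem.Set.mem_ofList, hw]
      rw [if_neg hmem]
      have : PySem.Set.ofList (p ++ [w]) = PySem.Set.ofList p ++ [w] := by
        rw [hofl, PySem.Set.add_of_not_mem hmem]
      simp only [pvCOf, this, List.map_append, List.map_map, Function.comp_def]
      simp only [Prod.mk.injEq]
      constructor
      · simp
      · simp only [List.map_cons, List.map_nil]
        refine congrArg₂ (· ++ ·) ?_ ?_
        · apply List.map_congr_left
          intro k hk
          have hkw : k ≠ w := fun h => hmem (h ▸ hk)
          simp [List.count_append, List.count_singleton, beq_false_of_ne (Ne.symm hkw)]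
        · simp [List.count_append, List.count_eq_zero.mpr hw]

-- a nested loop over lines and stripped words is a flat fold over the token list
theorem pvFoldNested {σ : Type} (lines : List String) (f : σ → String → σ) (s0 : σ) :
    lines.foldl (fun s line => (pvWords line).foldl (fun s w => f s (PySem.Str.strip w)) s) s0
      = (pvTokens lines).foldl f s0 := by
  rw [pvTokens, Eq.symm List.foldl_flatMap, ← List.map_flatMap, List.foldl_map]

theorem pvCountA_nested (lines : List String) :
    (lines.foldl (fun st line => (pvWords line).foldl
        (fun st w => pvBump st.1 st.2 (PySem.Str.strip w)) st)
        (([], []) : List String × List Int))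
      = ((pvCOf (pvTokens lines)).map Prod.fst, (pvCOf (pvTokens lines)).map Prod.snd) := by
  rw [pvFoldNested lines (fun st t => pvBump st.1 st.2 t), pvCountA]

theorem pvCountB (lines : List String) :
    (lines.foldl (fun d line => (pvWords line).foldl
        (fun d w => d.insert (PySem.Str.strip w) (d.getD (PySem.Str.strip w) 0 + 1)) d)
        (PySem.Dict.empty : PySem.Dict String Int)).items
      = pvCOf (pvTokens lines) := by
  have h := pvFoldNested (σ := PySem.Dict String Int) lines
    (fun d t => d.insert t (d.getD t 0 + 1)) PySem.Dict.empty
  rw [h, PySem.Dict.foldl_insert_getD_add_one_eq_counter, PySem.Dict.items_counter]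
  rfl

-- ---- A's two-list sort is the pair sort seen through the projections ----
theorem pvStep_commute (l : List (String × Int)) (i j : Nat) :
    (if (l.map Prod.snd).getD i 0 > (l.map Prod.snd).getD j 0
       then (pvSwap "" (l.map Prod.fst) i j, pvSwap 0 (l.map Prod.snd) i j)
       else (l.map Prod.fst, l.map Prod.snd))
      = ((pvStepP i j l).map Prod.fst, (pvStepP i j l).map Prod.snd) := by
  rw [pvStepP, pvGetD_map_snd, pvGetD_map_snd]
  by_cases h : (l.getD i pvD0).2 > (l.getD j pvD0).2
  · rw [if_pos h, if_pos h]
    simp only [pvSwap, pvSwapP, List.map_set, pvGetD_map_fst, pvGetD_map_snd]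
  · rw [if_neg h, if_neg h]

theorem pvPass_commute (js : List Nat) (i : Nat) (l : List (String × Int)) :
    js.foldl (fun st j =>
        if st.2.getD i 0 > st.2.getD j 0 then (pvSwap "" st.1 i j, pvSwap 0 st.2 i j)
        else st) (l.map Prod.fst, l.map Prod.snd)
      = ((pvPassP js i l).map Prod.fst, (pvPassP js i l).map Prod.snd) := by
  rw [pvPassP]
  induction js generalizing l with
  | nil => simp
  | cons j js ihj =>
    simp only [List.foldl_cons]
    rw [show (if ((l.map Prod.fst, l.map Prod.snd) : List String × List Int).2.getD i 0 >
          ((l.map Prod.fst, l.map Prod.snd) : List String × List Int).2.getD j 0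
        then (pvSwap "" (l.map Prod.fst) i j, pvSwap 0 (l.map Prod.snd) i j)
        else (l.map Prod.fst, l.map Prod.snd))
        = ((pvStepP i j l).map Prod.fst, (pvStepP i j l).map Prod.snd) from pvStep_commute l i j]
    exact ihj (pvStepP i j l)

theorem pvSortA_eq (is js : List Nat) (l : List (String × Int)) :
    is.foldl (fun st i => js.foldl (fun st j =>
        if st.2.getD i 0 > st.2.getD j 0 then (pvSwap "" st.1 i j, pvSwap 0 st.2 i j)
        else st) st) (l.map Prod.fst, l.map Prod.snd)
      = ((is.foldl (fun l i => pvPassP js i l) l).map Prod.fst,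
         (is.foldl (fun l i => pvPassP js i l) l).map Prod.snd) := by
  induction is generalizing l with
  | nil => simp
  | cons i is ihi =>
    simp only [List.foldl_cons]
    rw [pvPass_commute js i l, ihi (pvPassP js i l)]

-- ---- getD/set toolbox and swap facts ----
theorem pvGetD_set_self (l : List (String × Int)) (n : Nat) (v) (h : n < l.length) :
    (l.set n v).getD n pvD0 = v := by
  rw [List.getD_eq_getElem _ _ (by simpa using h)]; simp

theorem pvGetD_set_ne (l : List (String × Int)) (n m : Nat) (v) (h : n ≠ m) :
    (l.set n v).getD m pvD0 = l.getD m pvD0 := by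
  simp [List.getD, List.getElem?_set_ne h]

theorem pvStepP_length (i j : Nat) (l : List (String × Int)) :
    (pvStepP i j l).length = l.length := by
  unfold pvStepP; split <;> simp [pvSwapP]

theorem pvSwapP_getD_j (l : List (String × Int)) (i j : Nat) (hj : j < l.length) :
    (pvSwapP l i j).getD j pvD0 = l.getD i pvD0 := by
  unfold pvSwapP; exact pvGetD_set_self _ _ _ (by simpa using hj)

theorem pvSwapP_getD_i (l : List (String × Int)) (i j : Nat) (hi : i < l.length) (hij : i ≠ j) :
    (pvSwapP l i j).getD i pvD0 = l.getD j pvD0 := by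
  unfold pvSwapP
  rw [pvGetD_set_ne _ _ _ _ (Ne.symm hij), pvGetD_set_self _ _ _ hi]

theorem pvSwapP_getD_other (l : List (String × Int)) (i j k : Nat) (hki : k ≠ i) (hkj : k ≠ j) :
    (pvSwapP l i j).getD k pvD0 = l.getD k pvD0 := by
  unfold pvSwapP
  rw [pvGetD_set_ne _ _ _ _ (Ne.symm hkj), pvGetD_set_ne _ _ _ _ (Ne.symm hki)]

theorem pvSwapP_perm (l : List (String × Int)) (i j : Nat) (hi : i < l.length)
    (hj : j < l.length) : (pvSwapP l i j).Perm l := by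
  unfold pvSwapP
  rw [List.getD_eq_getElem _ _ hj, List.getD_eq_getElem _ _ hi]
  have := Array.swap_perm (xs := l.toArray) (i := i) (j := j) (by simpa) (by simpa)
  simp [Array.swap, Array.perm_iff_toList_perm] at this
  simpa using this

theorem pvStepP_perm (i j : Nat) (l : List (String × Int)) (hi : i < l.length)
    (hj : j < l.length) : (pvStepP i j l).Perm l := by
  unfold pvStepP; split
  · exact pvSwapP_perm l i j hi hj
  · exact List.Perm.refl l

theorem pvPassP_perm (js : List Nat) (i : Nat) (l : List (String × Int))
    (hi : i < l.length) (hjs : ∀ j ∈ js, j < l.length) : (pvPassP js i l).Perm l := by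
  unfold pvPassP
  induction js generalizing l with
  | nil => exact List.Perm.refl l
  | cons j js ih =>
    simp only [List.foldl_cons]
    have h1 : (pvStepP i j l).Perm l := pvStepP_perm i j l hi (hjs j (by simp))
    have hlen : (pvStepP i j l).length = l.length := pvStepP_length i j l
    have h2 := ih (pvStepP i j l) (hlen ▸ hi) (fun j' hj' => hlen ▸ hjs j' (by simp [hj']))
    exact h2.trans h1

theorem pvPassP_length (js : List Nat) (i : Nat) (l : List (String × Int)) :
    (pvPassP js i l).length = l.length := by
  unfold pvPassP
  induction js generalizing l with
  | nil => rfl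
  | cons j js ih => simp only [List.foldl_cons]; rw [ih, pvStepP_length]

theorem pvSortP_perm (c : List (String × Int)) : (pvSortP c).Perm c := by
  unfold pvSortP
  have : ∀ (is : List Nat) (l : List (String × Int)), l.length = c.length →
      (∀ i ∈ is, i < c.length) →
      (is.foldl (fun l i => pvPassP (List.range c.length) i l) l).Perm l := by
    intro is
    induction is with
    | nil => intro l _ _; exact List.Perm.refl l
    | cons i is ih =>
      intro l hlen his
      simp only [List.foldl_cons]
      have hi : i < l.length := by rw [hlen]; exact his i (by simp)
      have hperm : (pvPassP (List.range c.length) i l).Perm l :=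
        pvPassP_perm _ i l hi (fun j hj => by rw [hlen]; exact List.mem_range.mp hj)
      have hlen2 : (pvPassP (List.range c.length) i l).length = c.length := by
        rw [pvPassP_length, hlen]
      exact (ih _ hlen2 (fun i' hi' => his i' (by simp [hi']))).trans hperm
  exact this _ c rfl (fun i hi => List.mem_range.mp hi)

theorem pvSortP_length (c : List (String × Int)) : (pvSortP c).length = c.length :=
  (pvSortP_perm c).length_eq

-- ---- the head of the sorted list dominates ----
theorem pvStep_inv (A0 : String × Int) (n i j : Nat) (hi1 : 1 ≤ i) (hin : i < n)
    (hj1 : 1 ≤ j) (hjn : j < n) (l : List (String × Int))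
    (hlen : l.length = n) (h0 : l.getD 0 pvD0 = A0)
    (hreg : (l.getD i pvD0).2 ≤ A0.2) (hk : ∀ k < i, (l.getD k pvD0).2 ≤ A0.2) :
    (pvStepP i j l).length = n ∧ (pvStepP i j l).getD 0 pvD0 = A0 ∧
    ((pvStepP i j l).getD i pvD0).2 ≤ A0.2 ∧
    (∀ k < i, ((pvStepP i j l).getD k pvD0).2 ≤ A0.2) := by
  unfold pvStepP
  by_cases hc : (l.getD i pvD0).2 > (l.getD j pvD0).2
  · rw [if_pos hc]
    have hij : i ≠ j := by rintro rfl; omega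
    refine ⟨by simp [pvSwapP, hlen], ?_, ?_, ?_⟩
    · rw [pvSwapP_getD_other l i j 0 (by omega) (by omega)]; exact h0
    · rw [pvSwapP_getD_i l i j (by omega) hij]; omega
    · intro k hki
      by_cases hkj : k = j
      · have heq : (pvSwapP l i j).getD k pvD0 = l.getD i pvD0 := by
          rw [hkj]; exact pvSwapP_getD_j l i j (by omega)
        rw [heq]; exact hreg
      · rw [pvSwapP_getD_other l i j k (by omega) hkj]; exact hk k hki
  · rw [if_neg hc]; exact ⟨hlen, h0, hreg, hk⟩

theorem pvInner_inv (A0 : String × Int) (n i : Nat) (hi1 : 1 ≤ i) (hin : i < n)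
    (js : List Nat) :
    ∀ (l : List (String × Int)), (∀ j ∈ js, 1 ≤ j ∧ j < n) → l.length = n →
      l.getD 0 pvD0 = A0 →
      (l.getD i pvD0).2 ≤ A0.2 → (∀ k < i, (l.getD k pvD0).2 ≤ A0.2) →
      (js.foldl (fun l j => pvStepP i j l) l).length = n ∧
      (js.foldl (fun l j => pvStepP i j l) l).getD 0 pvD0 = A0 ∧
      ((js.foldl (fun l j => pvStepP i j l) l).getD i pvD0).2 ≤ A0.2 ∧
      (∀ k < i, ((js.foldl (fun l j => pvStepP i j l) l).getD k pvD0).2 ≤ A0.2) := by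
  induction js with
  | nil => intro l _ h1 h2 h3 h4; exact ⟨h1, h2, h3, h4⟩
  | cons j js ih =>
    intro l hjs h1 h2 h3 h4
    simp only [List.foldl_cons]
    obtain ⟨hj1, hjn⟩ := hjs j (by simp)
    obtain ⟨g1, g2, g3, g4⟩ := pvStep_inv A0 n i j hi1 hin hj1 hjn l h1 h2 h3 h4
    exact ih _ (fun j' hj' => hjs j' (by simp [hj'])) g1 g2 g3 g4

theorem pvPass_head (n i : Nat) (hi1 : 1 ≤ i) (hin : i < n) (l : List (String × Int))
    (hlen : l.length = n) (hpre : ∀ k < i, (l.getD k pvD0).2 ≤ (l.getD 0 pvD0).2) :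
    (pvPassP (List.range n) i l).length = n ∧
    ∀ k ≤ i, ((pvPassP (List.range n) i l).getD k pvD0).2
        ≤ ((pvPassP (List.range n) i l).getD 0 pvD0).2 := by
  have hrange : List.range n = 0 :: (List.range (n - 1)).map (· + 1) := by
    conv_lhs => rw [show n = (n - 1) + 1 by omega]
    rw [List.range_succ_eq_map]
  unfold pvPassP
  rw [hrange]
  simp only [List.foldl_cons]
  have hi0 : i ≠ 0 := by omega
  have hl1len : (pvStepP i 0 l).length = n := by rw [pvStepP_length, hlen]
  have key : (pvStepP i 0 l).getD 0 pvD0 = (if (l.getD i pvD0).2 > (l.getD 0 pvD0).2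
      then l.getD i pvD0 else l.getD 0 pvD0) := by
    unfold pvStepP
    by_cases hc : (l.getD i pvD0).2 > (l.getD 0 pvD0).2
    · rw [if_pos hc, if_pos hc, pvSwapP_getD_j l i 0 (by omega)]
    · rw [if_neg hc, if_neg hc]
  have hA0ge0 : (l.getD 0 pvD0).2 ≤ ((pvStepP i 0 l).getD 0 pvD0).2 := by
    rw [key]; split <;> omega
  have hreg : ((pvStepP i 0 l).getD i pvD0).2 ≤ ((pvStepP i 0 l).getD 0 pvD0).2 := by
    rw [key]
    unfold pvStepP
    by_cases hc : (l.getD i pvD0).2 > (l.getD 0 pvD0).2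
    · rw [if_pos hc, if_pos hc, pvSwapP_getD_i l i 0 (by omega) hi0]
      omega
    · rw [if_neg hc, if_neg hc]; omega
  have hk : ∀ k < i, ((pvStepP i 0 l).getD k pvD0).2 ≤ ((pvStepP i 0 l).getD 0 pvD0).2 := by
    intro k hki
    by_cases hk0 : k = 0
    · subst hk0; omega
    · have heq : (pvStepP i 0 l).getD k pvD0 = l.getD k pvD0 := by
        unfold pvStepP
        split
        · exact pvSwapP_getD_other l i 0 k (by omega) hk0
        · rfl
      rw [heq]
      exact le_trans (hpre k hki) hA0ge0
  have hjs : ∀ j ∈ (List.range (n - 1)).map (· + 1), 1 ≤ j ∧ j < n := by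
    intro j hj
    simp only [List.mem_map, List.mem_range] at hj
    obtain ⟨j', hj', rfl⟩ := hj
    omega
  obtain ⟨g1, g2, g3, g4⟩ := pvInner_inv ((pvStepP i 0 l).getD 0 pvD0) n i hi1 hin _
    (pvStepP i 0 l) hjs hl1len rfl hreg hk
  refine ⟨g1, fun k hki => ?_⟩
  rw [g2]
  rcases Nat.lt_or_ge k i with h | h
  · exact g4 k h
  · have : k = i := by omega
    subst this; exact g3

theorem pvSortP_head (c : List (String × Int)) :
    ∀ k < c.length, ((pvSortP c).getD k pvD0).2 ≤ ((pvSortP c).getD 0 pvD0).2 := by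
  have main : ∀ (m : Nat), m ≤ c.length →
      ((List.range m).foldl (fun l i => pvPassP (List.range c.length) i l) c).length = c.length ∧
      ∀ k < m, (((List.range m).foldl (fun l i => pvPassP (List.range c.length) i l) c).getD k pvD0).2
          ≤ (((List.range m).foldl (fun l i => pvPassP (List.range c.length) i l) c).getD 0 pvD0).2 := by
    intro m
    induction m with
    | zero => intro _; exact ⟨rfl, by omega⟩
    | succ m ih =>
      intro hm
      obtain ⟨ihlen, ihk⟩ := ih (by omega)
      rw [List.range_succ, List.foldl_append, List.foldl_cons, List.foldl_nil]
      set r := (List.range m).foldl (fun l i => pvPassP (List.range c.length) i l) c with hr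
      rcases Nat.eq_zero_or_pos m with hm0 | hm1
      · subst hm0
        constructor
        · rw [pvPassP_length]; exact ihlen
        · intro k hk; interval_cases k; omega
      · have := pvPass_head c.length m hm1 (by omega) r ihlen ihk
        exact ⟨this.1, fun k hk => this.2 k (by omega)⟩
  intro k hk
  have := (main c.length (le_refl _)).2 k hk
  unfold pvSortP
  exact this

-- every pair of a list is bounded by the head of its sort
theorem pvSortP_head_max (c : List (String × Int)) :
    ∀ x ∈ c, x.2 ≤ ((pvSortP c).getD 0 pvD0).2 := by
  intro x hx
  have hx' : x ∈ pvSortP c := ((pvSortP_perm c).mem_iff).mpr hx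
  obtain ⟨k, hk, hkx⟩ := List.mem_iff_getElem.mp hx'
  have hgetD : (pvSortP c).getD k pvD0 = x := by
    rw [List.getD_eq_getElem _ _ hk, hkx]
  have := pvSortP_head c k (by rw [← pvSortP_length c]; exact hk)
  rw [hgetD] at this
  exact this

theorem pvSortP_headD_mem (c : List (String × Int)) (hne : c ≠ []) :
    (pvSortP c).getD 0 pvD0 ∈ c := by
  have hlen : 0 < (pvSortP c).length := by
    rw [pvSortP_length]
    exact List.length_pos_iff.mpr hne
  have : (pvSortP c).getD 0 pvD0 ∈ pvSortP c := by
    rw [List.getD_eq_getElem _ _ hlen]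
    exact List.getElem_mem hlen
  exact ((pvSortP_perm c).mem_iff).mp this

-- when no swap can ever fire, the sort is the identity
theorem pvSortP_const (c : List (String × Int)) (M : Int) (h : ∀ x ∈ c, x.2 = M) :
    pvSortP c = c := by
  have hstep : ∀ i j, i < c.length → j < c.length → pvStepP i j c = c := by
    intro i j hi hj
    unfold pvStepP
    rw [if_neg]
    have h1 : (c.getD i pvD0).2 = M := by
      rw [List.getD_eq_getElem _ _ hi]; exact h _ (List.getElem_mem hi)
    have h2 : (c.getD j pvD0).2 = M := by
      rw [List.getD_eq_getElem _ _ hj]; exact h _ (List.getElem_mem hj)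
    omega
  have hpass : ∀ i, i < c.length → pvPassP (List.range c.length) i c = c := by
    intro i hi
    unfold pvPassP
    have : ∀ (js : List Nat), (∀ j ∈ js, j < c.length) →
        js.foldl (fun l j => pvStepP i j l) c = c := by
      intro js
      induction js with
      | nil => intro _; rfl
      | cons j js ih =>
        intro hjs
        simp only [List.foldl_cons]
        rw [hstep i j hi (hjs j (by simp))]
        exact ih (fun j' hj' => hjs j' (by simp [hj']))
    exact this _ (fun j hj => List.mem_range.mp hj)
  unfold pvSortP
  have : ∀ (is : List Nat), (∀ i ∈ is, i < c.length) →
      is.foldl (fun l i => pvPassP (List.range c.length) i l) c = c := by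
    intro is
    induction is with
    | nil => intro _; rfl
    | cons i is ih =>
      intro his
      simp only [List.foldl_cons]
      rw [hpass i (his i (by simp))]
      exact ih (fun i' hi' => his i' (by simp [hi']))
  exact this _ (fun i hi => List.mem_range.mp hi)

-- ---- B's linear scan ----
theorem pvScan_spec (rest : List (String × Int)) (p : String × Int) :
    (rest.foldl (fun b q => if q.2 > b.2 then q else b) p) ∈ p :: rest ∧
    ∀ x ∈ p :: rest, x.2 ≤ (rest.foldl (fun b q => if q.2 > b.2 then q else b) p).2 := by
  induction rest generalizing p with
  | nil => exact ⟨by simp, by simp⟩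
  | cons q rest ih =>
    simp only [List.foldl_cons]
    obtain ⟨ihmem, ihge⟩ := ih (if q.2 > p.2 then q else p)
    constructor
    · rcases List.mem_cons.mp ihmem with h | h
      · rw [h]
        by_cases hqp : q.2 > p.2
        · rw [if_pos hqp]; exact List.mem_cons_of_mem _ (List.mem_cons_self ..)
        · rw [if_neg hqp]; exact List.mem_cons_self ..
      · exact List.mem_cons_of_mem _ (List.mem_cons_of_mem _ h)
    · have hbase := ihge (if q.2 > p.2 then q else p) (List.mem_cons_self ..)
      intro x hx
      rcases List.mem_cons.mp hx with rfl | hx'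
      · refine le_trans ?_ hbase
        split <;> omega
      · rcases List.mem_cons.mp hx' with rfl | hx''
        · refine le_trans ?_ hbase
          split <;> omega
        · exact ihge x (List.mem_cons_of_mem _ hx'')

theorem pvScan_const (rest : List (String × Int)) (p : String × Int)
    (h : ∀ q ∈ rest, q.2 ≤ p.2) :
    rest.foldl (fun b q => if q.2 > b.2 then q else b) p = p := by
  induction rest with
  | nil => rfl
  | cons q rest ih =>
    simp only [List.foldl_cons]
    rw [if_neg (by have := h q (by simp); omega)]
    exact ih (fun q' hq' => h q' (by simp [hq']))

-- ---- frequencies are positive ----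
theorem pvCOf_pos (ws : List String) : ∀ x ∈ pvCOf ws, 1 ≤ x.2 := by
  intro x hx
  simp only [pvCOf, List.mem_map] at hx
  obtain ⟨k, hk, rfl⟩ := hx
  have : k ∈ ws := by
    have := PySem.Set.mem_ofList (y := k) (xs := ws)
    simp only [this] at hk
    exact hk
  have h1 : 1 ≤ ws.count k := List.one_le_count_iff.mpr this
  show (1 : Int) ≤ (ws.count k : Int)
  exact_mod_cast h1

-- the selected pair is the same on both sides, under either Pre_ case
theorem pvSelect_eq (p : String × Int) (rest : List (String × Int)) (M : Int)
    (hM : M = ((p :: rest).map (·.2)).foldl max 0)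
    (hpos : ∀ x ∈ p :: rest, 1 ≤ x.2)
    (hcase : (p :: rest).countP (fun x => x.2 == M) = 1 ∨ ∀ x ∈ p :: rest, x.2 = M) :
    (pvSortP (p :: rest)).getD 0 pvD0
      = rest.foldl (fun b q => if q.2 > b.2 then q else b) p := by
  have hhd_mem : (pvSortP (p :: rest)).getD 0 pvD0 ∈ p :: rest :=
    pvSortP_headD_mem _ (by simp)
  have hhd_max : ∀ x ∈ p :: rest, x.2 ≤ ((pvSortP (p :: rest)).getD 0 pvD0).2 :=
    pvSortP_head_max _
  obtain ⟨hbest_mem, hbest_max⟩ := pvScan_spec rest p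
  rcases hcase with huniq | hall
  · -- unique most-frequent topic
    have hMub : ∀ x ∈ p :: rest, x.2 ≤ M := by
      intro x hx
      rw [hM]
      exact (PySem.List.le_foldl_max (((p :: rest)).map (·.2)) 0).2 x.2 (List.mem_map_of_mem hx)
    have hMmem : ∃ x ∈ p :: rest, x.2 = M := by
      rcases PySem.List.foldl_max_mem (((p :: rest)).map (·.2)) 0 with h0 | hmem
      · exfalso
        have h1 := hpos p (List.mem_cons_self ..)
        have h2 := hMub p (List.mem_cons_self ..)
        rw [hM] at h2
        omega
      · rw [← hM] at hmem
        obtain ⟨x, hx, hx2⟩ := List.mem_map.mp hmem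
        exact ⟨x, hx, hx2⟩
    obtain ⟨xm, hxm, hxm2⟩ := hMmem
    have hhdM : ((pvSortP (p :: rest)).getD 0 pvD0).2 = M :=
      le_antisymm (hMub _ hhd_mem) (hxm2 ▸ hhd_max xm hxm)
    have hbestM : (rest.foldl (fun b q => if q.2 > b.2 then q else b) p).2 = M :=
      le_antisymm (hMub _ hbest_mem) (hxm2 ▸ hbest_max xm hxm)
    have hfil : ((p :: rest).filter (fun x => x.2 == M)).length = 1 := by
      rw [← List.countP_eq_length_filter]
      exact huniq
    obtain ⟨z, hz⟩ := List.length_eq_one_iff.mp hfil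
    have hzh : (pvSortP (p :: rest)).getD 0 pvD0 = z := by
      have hm : (pvSortP (p :: rest)).getD 0 pvD0 ∈ (p :: rest).filter (fun x => x.2 == M) :=
        List.mem_filter.mpr ⟨hhd_mem, by simp only [beq_iff_eq]; exact hhdM⟩
      rw [hz] at hm
      simpa using hm
    have hzb : rest.foldl (fun b q => if q.2 > b.2 then q else b) p = z := by
      have hm : rest.foldl (fun b q => if q.2 > b.2 then q else b) p
          ∈ (p :: rest).filter (fun x => x.2 == M) :=
        List.mem_filter.mpr ⟨hbest_mem, by simp only [beq_iff_eq]; exact hbestM⟩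
      rw [hz] at hm
      simpa using hm
    rw [hzh, hzb]
  · -- all frequencies equal: neither side moves anything
    have hsorteq : pvSortP (p :: rest) = p :: rest := pvSortP_const _ M hall
    have hscan : rest.foldl (fun b q => if q.2 > b.2 then q else b) p = p := by
      apply pvScan_const
      intro q hq
      rw [hall q (List.mem_cons_of_mem _ hq), hall p (List.mem_cons_self ..)]
    rw [hsorteq, hscan]
    simp [pvD0]

-- ===== VERDICT (by name: the statement is the Claim_ definition above) =====
theorem newCentroid_spec : Claim_equal_newCentroid := by
  intro lines _ hpre
  obtain ⟨hne, hcase⟩ := hpre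
  unfold Spec_newCentroid
  simp only [newCentroid, newCentroid_alt]
  rw [pvCountA_nested lines, pvCountB lines]
  have hcne : pvCOf (pvTokens lines) ≠ [] := by
    intro h
    apply hne
    cases hws : pvTokens lines with
    | nil => rfl
    | cons w ws' =>
      exfalso
      have hmem : w ∈ PySem.Set.ofList (pvTokens lines) := by
        have := PySem.Set.mem_ofList (y := w) (xs := pvTokens lines)
        simp only [this, hws]
        simp
      rw [pvCOf] at h
      rw [List.map_eq_nil_iff] at h
      rw [h] at hmem
      simp at hmem
  obtain ⟨p, rest, hc⟩ := List.exists_cons_of_ne_nil hcne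
  have hM : pvMaxF lines = ((p :: rest).map (·.2)).foldl max 0 := by
    unfold pvMaxF
    rw [pvPairs_eq, hc]
  have hpos : ∀ x ∈ p :: rest, 1 ≤ x.2 := by
    rw [← hc]; exact pvCOf_pos (pvTokens lines)
  rw [pvPairs_eq, hc] at hcase
  have hsel := pvSelect_eq p rest (pvMaxF lines) hM hpos hcase
  rw [hc]
  have hlenmap : (((p :: rest) : List (String × Int)).map Prod.snd).length
      = ((p :: rest) : List (String × Int)).length := List.length_map ..
  rw [hlenmap, pvSortA_eq]
  have hsort : (List.range ((p :: rest) : List (String × Int)).length).foldl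
      (fun l i => pvPassP (List.range ((p :: rest) : List (String × Int)).length) i l)
      (p :: rest) = pvSortP (p :: rest) := rfl
  rw [hsort, pvGetD_map_fst, hsel]
  simp [pvD0]
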